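-- pv_equiv track=rewrite | github.com/bs10081/NCNU_Python_Class | 3test/cardGame-yaya.py | throwCard
-- ===== SOURCE A (Python) =====
-- def throwCard(n, hands, throw=None, score=0, maxScore=0) :
--     for i in range(n) :
--         # 若花色或數字一樣，則可丟掉
--         if throw == None or hands[i] // 13 == throw // 13 or hands[i] % 13 == throw % 13 :
--             tmp = throwCard(n-1, hands[:i] + hands[i+1:], hands[i], score+1, maxScore)
--             if tmp > maxScore :
--                 maxScore = tmp
--     if maxScore < score :
--         maxScore = score
--     return maxScore
-- ===== SOURCE B (Python) =====
-- def throwCard(n, hands, throw=None, score=0, maxScore=0):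
--     # memoized DP over (remaining-cards tuple, last thrown card) instead of plain factorial search
--     cards = tuple(hands[:max(n, 0)])
--     memo = {}
--
--     def best(cards, last):
--         key = (cards, last)
--         if key in memo:
--             return memo[key]
--         r = 0
--         for idx, c in enumerate(cards):
--             if last is None or c // 13 == last // 13 or c % 13 == last % 13:
--                 v = best(cards[:idx] + cards[idx + 1:], c)
--                 if 1 + v > r:
--                     r = 1 + v
--         memo[key] = r
--         return r
--
--     return max(maxScore, score + best(cards, throw))
-- ===== Notes on version B (the rewrite author's own statement) =====
-- stated objective: alternative
-- what changed: Replaces A's brute-force recursion over throw orders (with threaded score/maxScore accumulators) by a pure chain-length search memoized on (remaining-cards tuple, last thrown card), so each such state is solved once; still exponential in the worst case.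
import Mathlib
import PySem

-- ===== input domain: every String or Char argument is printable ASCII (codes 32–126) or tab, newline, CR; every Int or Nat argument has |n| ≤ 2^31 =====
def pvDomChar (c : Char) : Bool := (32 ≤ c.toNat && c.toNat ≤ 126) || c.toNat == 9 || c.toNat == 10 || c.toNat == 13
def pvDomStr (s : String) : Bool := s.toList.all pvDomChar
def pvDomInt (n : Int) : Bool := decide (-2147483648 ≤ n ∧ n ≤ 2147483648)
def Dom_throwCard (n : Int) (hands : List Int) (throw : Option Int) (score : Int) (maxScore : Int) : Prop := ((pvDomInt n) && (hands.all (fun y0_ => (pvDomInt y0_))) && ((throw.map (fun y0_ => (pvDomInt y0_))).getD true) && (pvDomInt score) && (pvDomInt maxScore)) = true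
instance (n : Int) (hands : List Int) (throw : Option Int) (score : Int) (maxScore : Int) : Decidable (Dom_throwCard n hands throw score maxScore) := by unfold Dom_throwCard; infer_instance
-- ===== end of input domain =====

-- B replaces A's factorial brute-force search by a memoized search over (remaining-cards, last-thrown) states; return values proved equal whenever n ≤ len(hands) (elsewhere A raises IndexError).

-- ===== PORT A =====
-- 'throw == None or hands[i]//13 == throw//13 or hands[i]%13 == throw%13' (same line in both Pythons)
def compat (c : Int) (t : Option Int) : Bool :=
  match t with
  | none => true
  | some tv => (PySem.Int.floordiv c 13 == PySem.Int.floordiv tv 13)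
      || (PySem.Int.mod c 13 == PySem.Int.mod tv 13)

-- fuel = n.toNat makes the n-1 recursion structural; it equals A's recursion depth on every input A accepts
def throwCardA (fuel : Nat) (n : Int) (hands : List Int) (throw : Option Int) (score : Int) (maxScore : Int) : Int :=
  match fuel with
  | 0 => if maxScore < score then score else maxScore
  | g+1 =>
    let ms := (PySem.List.pyRange 0 n 1).foldl
      (fun ms i =>
        if compat (PySem.List.pyGetD hands i 0) throw then
          let tmp := throwCardA g (n-1)
            (PySem.List.slice hands none (some i) ++ PySem.List.slice hands (some (i+1)) none)
            (some (PySem.List.pyGetD hands i 0)) (score+1) ms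
          if tmp > ms then tmp else ms
        else ms) maxScore
    if ms < score then score else ms

def throwCard (n : Int) (hands : List Int) (throw : Option Int) (score : Int) (maxScore : Int) : Int :=
  throwCardA n.toNat n hands throw score maxScore

-- ===== PORT B =====
-- memo : dict keyed by (remaining-cards tuple, last thrown card); fuel = cards.length makes the recursion structural
def bestB (fuel : Nat) (cards : List Int) (last : Option Int)
    (memo : PySem.Dict (List Int × Option Int) Int) :
    Int × PySem.Dict (List Int × Option Int) Int :=
  match PySem.Dict.get? memo (cards, last) with
  | some v => (v, memo)
  | none =>
    match fuel with
    | 0 => (0, PySem.Dict.insert memo (cards, last) 0)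
    | g+1 =>
      let p := (PySem.List.enumerate cards).foldl
        (fun rm ic =>
          if compat ic.2 last then
            let vm := bestB g
              (PySem.List.slice cards none (some ic.1) ++ PySem.List.slice cards (some (ic.1+1)) none)
              (some ic.2) rm.2
            if 1 + vm.1 > rm.1 then (1 + vm.1, vm.2) else (rm.1, vm.2)
          else rm)
        (0, memo)
      (p.1, PySem.Dict.insert p.2 (cards, last) p.1)

def throwCard_alt (n : Int) (hands : List Int) (throw : Option Int) (score : Int) (maxScore : Int) : Int :=
  let cards := PySem.List.slice hands none (some (max n 0))
  max maxScore (score + (bestB cards.length cards throw PySem.Dict.empty).1)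

-- ===== PRECONDITION & SPEC =====
-- exactly the inputs on which A returns: for n > len(hands) the loop reaches hands[len] and raises IndexError
def Pre_throwCard (n : Int) (hands : List Int) (throw : Option Int) (score : Int) (maxScore : Int) : Prop :=
  n ≤ (hands.length : Int)
instance (n : Int) (hands : List Int) (throw : Option Int) (score : Int) (maxScore : Int) : Decidable (Pre_throwCard n hands throw score maxScore) := by unfold Pre_throwCard; infer_instance

def pvWitness_throwCard : Int × List Int × Option Int × Int × Int := (2, [5, 18], some 3, 0, 0)

def Spec_throwCard (n : Int) (hands : List Int) (throw : Option Int) (score : Int) (maxScore : Int) (out : Int) : Prop := out = throwCard_alt n hands throw score maxScore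
instance (n : Int) (hands : List Int) (throw : Option Int) (score : Int) (maxScore : Int) (out : Int) : Decidable (Spec_throwCard n hands throw score maxScore out) := by unfold Spec_throwCard; infer_instance

-- ===== CLAIM (what is proved, stated in full; the proofs are below) =====
def Claim_equal_throwCard : Prop := ∀ (n : Int) (hands : List Int) (throw : Option Int) (score : Int) (maxScore : Int), Dom_throwCard n hands throw score maxScore → Pre_throwCard n hands throw score maxScore → Spec_throwCard n hands throw score maxScore (throwCard n hands throw score maxScore)

-- ===== LEMMAS AND PROOFS =====

-- the longest chain throwable from `cards` after `last` (pure reference function; fuel = cards.length)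
def chainC : Nat → List Int → Option Int → Int
  | 0, _, _ => 0
  | g+1, cards, last =>
    (PySem.List.enumerate cards).foldl
      (fun r ic =>
        if compat ic.2 last then
          max r (1 + chainC g
            (PySem.List.slice cards none (some ic.1) ++ PySem.List.slice cards (some (ic.1+1)) none)
            (some ic.2))
        else r) 0

lemma slice_erase (xs : List Int) (i : Int) (h : 0 ≤ i) :
    PySem.List.slice xs none (some i) ++ PySem.List.slice xs (some (i+1)) none = xs.eraseIdx i.toNat := by
  rw [PySem.List.slice_to xs h, PySem.List.slice_from xs (by omega : (0:ℤ) ≤ i + 1),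
    List.eraseIdx_eq_take_drop_succ]
  have h1 : (i+1).toNat = i.toNat + 1 := by omega
  rw [h1]

lemma take_eraseIdx_comm (xs : List Int) (k g : Nat) (hk : k < g + 1) (hg : g + 1 ≤ xs.length) :
    List.take g (xs.eraseIdx k) = (List.take (g+1) xs).eraseIdx k := by
  rw [List.eraseIdx_eq_take_drop_succ, List.eraseIdx_eq_take_drop_succ]
  rw [List.take_append, List.take_take, List.length_take, List.take_take, List.drop_take]
  have h1 : min g k = k := by omega
  have h2 : min k (g+1) = k := by omega
  have h3 : g - min k xs.length = g + 1 - (k+1) := by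
    have : min k xs.length = k := by omega
    omega
  rw [h1, h2, h3]

lemma ite_lt_eq_max (a b : Int) : (if a < b then b else a) = max a b := by
  split_ifs <;> omega

lemma condmax_absorb {l : Type} (P : l → Bool) (v : l → Int) :
    ∀ (L : List l) (x y : Int),
    max (L.foldl (fun m i => if P i then max m (v i) else m) x) y
      = L.foldl (fun m i => if P i then max m (v i) else m) (max x y) := by
  intro L
  induction L with
  | nil => intro x y; rfl
  | cons i t ih =>
    intro x y
    simp only [List.foldl_cons]
    by_cases h : P i = true
    · rw [if_pos h, if_pos h, ih]
      congr 1
      omega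
    · rw [if_neg h, if_neg h]
      exact ih x y

lemma condmax_shift {l : Type} (P : l → Bool) (v : l → Int) (s : Int) :
    ∀ (L : List l) (x r : Int),
    L.foldl (fun m i => if P i then max m (s + v i) else m) (max x (s + r))
      = max x (s + L.foldl (fun m i => if P i then max m (v i) else m) r) := by
  intro L
  induction L with
  | nil => intro x r; rfl
  | cons i t ih =>
    intro x r
    simp only [List.foldl_cons]
    by_cases h : P i = true
    · rw [if_pos h, if_pos h]
      have heq : max (max x (s + r)) (s + v i) = max x (s + max r (v i)) := by omega
      rw [heq, ih]
    · rw [if_neg h, if_neg h]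
      exact ih x r

lemma throwCardA_eq (f : Nat) : ∀ (n : Int) (hands : List Int) (throw : Option Int) (score ms : Int),
    f = n.toNat → n ≤ (hands.length : Int) →
    throwCardA f n hands throw score ms = max ms (score + chainC f (hands.take f) throw) := by
  induction f with
  | zero =>
    intro n hands throw score ms _ _
    simp only [throwCardA, chainC]
    omega
  | succ g ih =>
    intro n hands throw score ms hf hlen
    have hn : n = (g : Int) + 1 := by omega
    subst hn
    simp only [throwCardA]
    have hA : (PySem.List.pyRange 0 ((g:Int)+1) 1).foldl
        (fun ms i =>
          if compat (PySem.List.pyGetD hands i 0) throw then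
            let tmp := throwCardA g ((g:Int)+1-1)
              (PySem.List.slice hands none (some i) ++ PySem.List.slice hands (some (i+1)) none)
              (some (PySem.List.pyGetD hands i 0)) (score+1) ms
            if tmp > ms then tmp else ms
          else ms) ms
      = (PySem.List.pyRange 0 ((g:Int)+1) 1).foldl
        (fun m i =>
          if compat (PySem.List.pyGetD hands i 0) throw then
            max m (score + (1 + chainC g ((List.take (g+1) hands).eraseIdx i.toNat)
              (some (PySem.List.pyGetD hands i 0)))) else m) ms := by
      apply PySem.List.foldl_congr_mem
      intro acc i hi
      obtain ⟨h0, hib⟩ := PySem.List.mem_pyRange_one.mp hi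
      by_cases hc : compat (PySem.List.pyGetD hands i 0) throw = true
      · rw [if_pos hc, if_pos hc]
        rw [slice_erase hands i h0]
        have hi' : i.toNat < hands.length := by omega
        have hel : ((hands.eraseIdx i.toNat).length : Int) = (hands.length : Int) - 1 := by
          rw [List.length_eraseIdx, if_pos hi']
          omega
        rw [ih ((g:Int)+1-1) (hands.eraseIdx i.toNat) (some (PySem.List.pyGetD hands i 0))
          (score+1) acc (by omega) (by omega)]
        rw [take_eraseIdx_comm hands i.toNat g (by omega) (by omega)]
        generalize chainC g ((List.take (g+1) hands).eraseIdx i.toNat)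
          (some (PySem.List.pyGetD hands i 0)) = c
        show (if max acc (score + 1 + c) > acc then max acc (score + 1 + c) else acc)
          = max acc (score + (1 + c))
        split_ifs <;> omega
      · rw [if_neg hc, if_neg hc]
    have hclen : (List.take (g+1) hands).length = g+1 := by
      rw [List.length_take]; omega
    have hB : chainC (g+1) (List.take (g+1) hands) throw
      = (PySem.List.pyRange 0 ((g:Int)+1) 1).foldl
        (fun m i =>
          if compat (PySem.List.pyGetD hands i 0) throw then
            max m (1 + chainC g ((List.take (g+1) hands).eraseIdx i.toNat)
              (some (PySem.List.pyGetD hands i 0))) else m) 0 := by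
      conv_lhs => rw [chainC]
      rw [PySem.List.enumerate_eq_map_pyRange (List.take (g+1) hands) 0, List.foldl_map,
        PySem.List.len_eq, hclen]
      push_cast
      apply PySem.List.foldl_congr_mem
      intro acc j hj
      obtain ⟨h0, hjb⟩ := PySem.List.mem_pyRange_one.mp hj
      have hget : PySem.List.pyGetD (List.take (g+1) hands) j 0 = PySem.List.pyGetD hands j 0 := by
        rw [PySem.List.pyGetD_of_nonneg _ 0 h0, PySem.List.pyGetD_of_nonneg _ 0 h0,
          List.getD_eq_getElem?_getD, List.getD_eq_getElem?_getD,
          List.getElem?_take_of_lt (by omega : j.toNat < g+1)]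
      rw [slice_erase _ j h0, hget]
    rw [hA, ite_lt_eq_max, condmax_absorb]
    have hseed : max ms score = max ms (score + 0) := by omega
    rw [hseed, condmax_shift, hB]

-- every value cached in the memo is the true chain length for its key
def memoGood (memo : PySem.Dict (List Int × Option Int) Int) : Prop :=
  ∀ (cs : List Int) (t : Option Int) (v : Int),
    memo.get? (cs, t) = some v → v = chainC cs.length cs t

lemma memoGood_empty : memoGood PySem.Dict.empty := by
  intro cs t v h
  rw [PySem.Dict.get?_empty] at h
  cases h

lemma bestB_eq (f : Nat) : ∀ (cards : List Int) (last : Option Int)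
    (memo : PySem.Dict (List Int × Option Int) Int),
    f = cards.length → memoGood memo →
    (bestB f cards last memo).1 = chainC f cards last ∧ memoGood (bestB f cards last memo).2 := by
  induction f with
  | zero =>
    intro cards last memo hf hm
    have hc : cards = [] := List.eq_nil_of_length_eq_zero hf.symm
    subst hc
    rw [bestB]
    cases hget : PySem.Dict.get? memo (([] : List Int), last) with
    | some v =>
      simp only
      exact ⟨hm [] last v hget, hm⟩
    | none =>
      simp only
      refine ⟨rfl, ?_⟩
      intro cs t v hv
      rw [PySem.Dict.get?_insert] at hv
      split at hv
      · next heq =>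
          obtain ⟨hcs, ht⟩ := Prod.mk.injEq .. ▸ heq
          injection hv with hv0
          subst hcs
          rw [← hv0]
          rfl
      · exact hm cs t v hv
  | succ g ih =>
    intro cards last memo hf hm
    rw [bestB]
    cases hget : PySem.Dict.get? memo (cards, last) with
    | some v =>
      simp only
      refine ⟨?_, hm⟩
      rw [hm cards last v hget, ← hf]
    | none =>
      simp only
      have key : ∀ (L : List (Int × Int)), (∀ ic ∈ L, 0 ≤ ic.1 ∧ ic.1 < (cards.length : Int)) →
          ∀ (r : Int) (m : PySem.Dict (List Int × Option Int) Int), memoGood m →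
          ((L.foldl (fun rm ic =>
              if compat ic.2 last then
                let vm := bestB g
                  (PySem.List.slice cards none (some ic.1) ++ PySem.List.slice cards (some (ic.1+1)) none)
                  (some ic.2) rm.2
                if 1 + vm.1 > rm.1 then (1 + vm.1, vm.2) else (rm.1, vm.2)
              else rm) (r, m)).1
            = L.foldl (fun r ic =>
                if compat ic.2 last then
                  max r (1 + chainC g
                    (PySem.List.slice cards none (some ic.1) ++ PySem.List.slice cards (some (ic.1+1)) none)
                    (some ic.2))
                else r) r)
          ∧ memoGood (L.foldl (fun rm ic =>
              if compat ic.2 last then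
                let vm := bestB g
                  (PySem.List.slice cards none (some ic.1) ++ PySem.List.slice cards (some (ic.1+1)) none)
                  (some ic.2) rm.2
                if 1 + vm.1 > rm.1 then (1 + vm.1, vm.2) else (rm.1, vm.2)
              else rm) (r, m)).2 := by
        intro L
        induction L with
        | nil => intro _ r m hm'; exact ⟨rfl, hm'⟩
        | cons ic L ihL =>
          intro hmem r m hm'
          obtain ⟨h0, hib⟩ := hmem ic (List.mem_cons_self ..)
          simp only [List.foldl_cons]
          by_cases hc : compat ic.2 last = true
          · rw [if_pos hc, if_pos hc]
            have hrl : (PySem.List.slice cards none (some ic.1)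
                ++ PySem.List.slice cards (some (ic.1+1)) none).length = g := by
              rw [slice_erase cards ic.1 h0, List.length_eraseIdx,
                if_pos (by omega : ic.1.toNat < cards.length)]
              omega
            obtain ⟨hv1, hv2⟩ := ih _ (some ic.2) m hrl.symm hm'
            rw [hv1]
            have hstep : (if 1 + chainC g
                  (PySem.List.slice cards none (some ic.1) ++ PySem.List.slice cards (some (ic.1+1)) none)
                  (some ic.2) > r then
                ((1 + chainC g
                  (PySem.List.slice cards none (some ic.1) ++ PySem.List.slice cards (some (ic.1+1)) none)
                  (some ic.2) : Int),
                 (bestB g (PySem.List.slice cards none (some ic.1) ++ PySem.List.slice cards (some (ic.1+1)) none) (some ic.2) m).2)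
              else (r, (bestB g (PySem.List.slice cards none (some ic.1) ++ PySem.List.slice cards (some (ic.1+1)) none) (some ic.2) m).2))
              = (max r (1 + chainC g
                  (PySem.List.slice cards none (some ic.1) ++ PySem.List.slice cards (some (ic.1+1)) none)
                  (some ic.2)),
                 (bestB g (PySem.List.slice cards none (some ic.1) ++ PySem.List.slice cards (some (ic.1+1)) none) (some ic.2) m).2) := by
              split_ifs with h <;> simp [Prod.ext_iff] <;> omega
            rw [hstep]
            exact ihL (fun ic' h' => hmem ic' (List.mem_cons_of_mem _ h')) _ _ hv2
          · rw [if_neg hc, if_neg hc]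
            exact ihL (fun ic' h' => hmem ic' (List.mem_cons_of_mem _ h')) r m hm'
      have hbounds : ∀ ic ∈ PySem.List.enumerate cards, 0 ≤ ic.1 ∧ ic.1 < (cards.length : Int) := by
        intro ic hic
        obtain ⟨k, hk, hp⟩ := (PySem.List.mem_enumerate_iff cards 0 ic).mp hic
        rw [hp]
        constructor <;> simp <;> omega
      obtain ⟨h1, h2⟩ := key (PySem.List.enumerate cards) hbounds 0 memo hm
      constructor
      · rw [h1]
        conv_rhs => rw [chainC]
      · intro cs t v hv
        rw [PySem.Dict.get?_insert] at hv
        split at hv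
        · next heq =>
            obtain ⟨hcs, ht⟩ := Prod.mk.injEq .. ▸ heq
            injection hv with hv0
            subst hcs
            subst ht
            rw [← hv0, h1, ← hf]
            conv_rhs => rw [chainC]
        · exact h2 cs t v hv

-- ===== VERDICT (by name: the statement is the Claim_ definition above) =====
theorem throwCard_spec : Claim_equal_throwCard := by
  intro n hands throw score maxScore _ hpre
  unfold Pre_throwCard at hpre
  unfold Spec_throwCard throwCard throwCard_alt
  rw [throwCardA_eq n.toNat n hands throw score maxScore rfl hpre]
  have hcards : PySem.List.slice hands none (some (max n 0)) = hands.take n.toNat := by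
    rw [PySem.List.slice_to hands (le_max_right n 0)]
    congr 1
    omega
  rw [hcards]
  show max maxScore (score + chainC n.toNat (hands.take n.toNat) throw)
    = max maxScore (score + (bestB (hands.take n.toNat).length (hands.take n.toNat) throw PySem.Dict.empty).1)
  rw [(bestB_eq (hands.take n.toNat).length (hands.take n.toNat) throw PySem.Dict.empty rfl memoGood_empty).1]
  have hlen2 : (hands.take n.toNat).length = n.toNat := by
    rw [List.length_take]; omega
  rw [hlen2]
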